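-- pv_equiv track=rewrite | github.com/sbackus/mars-rover | mars_rover_kata.py | mars_rover
-- ===== SOURCE A (Python) =====
-- MINIMUM_MOON_UNIT = 0
--
-- MAXIMUM_MOON_UNIT = 9
--
-- DIRECTIONS = ["N", "E", "S", "W"]
--
-- def mars_rover(commands):
--     direction = "N"
--     x = 0
--     y = 0
--     vector = {
--         "N": (0, 1),
--         "E": (1, 0),
--         "S": (0, -1),
--         "W": (-1, 0)
--     }
--     for command in commands:
--         if command == "F":
--             vector_x, vector_y = vector[direction]
--             x += vector_x
--             y += vector_y
--         x, y = warp_drive(x), warp_drive(y)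
--         direction = turn(direction, command)
--     return f"{x}:{y}:{direction}"
--
-- def turn(current_heading, turn_signal):
--     direction_index = DIRECTIONS.index(current_heading)
--     if turn_signal == "R":
--         direction_index += 1
--     elif turn_signal == "L":
--         direction_index -= 1
--
--     return DIRECTIONS[direction_index % len(DIRECTIONS)]
--
-- def warp_drive(coord):
--     if coord < MINIMUM_MOON_UNIT:
--         return MAXIMUM_MOON_UNIT
--     if coord > MAXIMUM_MOON_UNIT:
--         return MINIMUM_MOON_UNIT
--     return coord
-- ===== SOURCE B (Python) =====
-- def mars_rover(commands):
--     # Rotate the world instead of the rover: the position is kept in the rover's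
--     # own reference frame (forward is always +y), so 'F' is always y+1 mod 10 and
--     # turns rotate the stored position on the 10x10 torus while a counter records
--     # the net quarter-turns; the final world position and letter are read off once.
--     x = y = 0
--     k = 0  # net clockwise quarter-turns
--     for c in commands:
--         if c == "F":
--             y = (y + 1) % 10
--         elif c == "R":
--             k += 1
--             x, y = (-y) % 10, x
--         elif c == "L":
--             k -= 1
--             x, y = y, (-x) % 10
--     for _ in range(k % 4):
--         x, y = y, (-x) % 10
--     return f"{x}:{y}:" + "NESW"[k % 4]
-- ===== Notes on version B (the rewrite author's own statement) =====
-- stated objective: alternative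
-- what changed: B rotates the world instead of the rover: the position is stored in the rover's own reference frame where forward is always +y, so a forward command is a fixed y+1 mod 10, turn commands rotate the stored position on the 10x10 torus while an integer counter records net quarter-turns, and the world position and heading letter are reconstructed once at the end from the counter; A's heading letter, vector dict, DIRECTIONS.index arithmetic and branching warp_drive disappear from the loop (constant-factor: no dict/list-index lookups per step).
import Mathlib
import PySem

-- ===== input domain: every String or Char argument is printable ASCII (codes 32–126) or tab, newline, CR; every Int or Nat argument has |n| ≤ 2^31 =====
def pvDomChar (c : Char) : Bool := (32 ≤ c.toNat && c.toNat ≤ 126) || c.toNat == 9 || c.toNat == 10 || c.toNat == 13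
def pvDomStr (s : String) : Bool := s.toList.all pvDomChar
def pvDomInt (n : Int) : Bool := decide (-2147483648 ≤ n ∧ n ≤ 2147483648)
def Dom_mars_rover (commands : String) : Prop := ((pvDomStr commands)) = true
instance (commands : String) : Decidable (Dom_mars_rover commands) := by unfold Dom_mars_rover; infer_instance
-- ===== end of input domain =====

-- B rotates the world instead of the rover: the position is kept in the rover's own
-- frame (forward is always +y), turns rotate the stored position on the torus and a
-- counter records net quarter-turns; heading letter and world position are read off
-- once at the end (objective: alternative).

-- ===== PORT A =====
def pyDIRECTIONS : List String := ["N", "E", "S", "W"]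

def warp_drive (coord : Int) : Int :=
  if coord < 0 then 9
  else if coord > 9 then 0
  else coord

-- Python's commands iterate over 1-char strings; they are modelled as Char and the
-- comparisons `command == "F"` / `== "R"` / `== "L"` as Char equality (exact).
-- `DIRECTIONS.index` (ValueError never raised: heading always in DIRECTIONS) and the
-- `[... % 4]` access (always in range) are totalised with unread defaults.
def turn (current_heading : String) (turn_signal : Char) : String :=
  let direction_index : Int := ((PySem.List.index? pyDIRECTIONS current_heading).getD 0 : Nat)
  let direction_index :=
    if turn_signal = 'R' then direction_index + 1
    else if turn_signal = 'L' then direction_index - 1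
    else direction_index
  (PySem.List.pyGet? pyDIRECTIONS (PySem.Int.mod direction_index 4)).getD "N"

def pyVector : PySem.Dict String (Int × Int) :=
  PySem.Dict.ofList [("N", (0, 1)), ("E", (1, 0)), ("S", (0, -1)), ("W", (-1, 0))]

-- KeyError impossible: `direction` is always a key of the vector dict.
def marsStep (st : String × Int × Int) (command : Char) : String × Int × Int :=
  let (direction, x, y) := st
  let (x, y) :=
    if command = 'F' then
      let v := (pyVector.get? direction).getD (0, 0)
      (x + v.1, y + v.2)
    else (x, y)
  let x := warp_drive x
  let y := warp_drive y
  (turn direction command, x, y)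

def mars_rover (commands : String) : String :=
  let st := commands.toList.foldl marsStep ("N", 0, 0)
  PySem.Int.toStr st.2.1 ++ ":" ++ PySem.Int.toStr st.2.2 ++ ":" ++ st.1

-- ===== PORT B =====
-- state is (x, y, k): position in the rover's own frame, k = net clockwise quarter-turns
def altStep (st : Int × Int × Int) (c : Char) : Int × Int × Int :=
  let (x, y, k) := st
  if c = 'F' then (x, PySem.Int.mod (y + 1) 10, k)
  else if c = 'R' then (PySem.Int.mod (-y) 10, x, k + 1)
  else if c = 'L' then (y, PySem.Int.mod (-x) 10, k - 1)
  else st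

-- Source B's final `for _ in range(k % 4): x, y = y, (-x) % 10` and `"NESW"[k % 4]`
-- (the string index is always in range 0..3; totalised with an unread default)
def mars_rover_alt (commands : String) : String :=
  let st := commands.toList.foldl altStep (0, 0, 0)
  let m := PySem.Int.mod st.2.2 4
  let p := (List.range m.toNat).foldl
    (fun (p : Int × Int) _ => (p.2, PySem.Int.mod (-p.1) 10)) (st.1, st.2.1)
  let letter := ((PySem.Str.pyGet? "NESW" m).map (fun c => String.ofList [c])).getD "N"
  PySem.Int.toStr p.1 ++ ":" ++ PySem.Int.toStr p.2 ++ ":" ++ letter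

-- ===== PRECONDITION & SPEC =====
def Spec_mars_rover (commands : String) (out : String) : Prop := out = mars_rover_alt commands
instance (commands : String) (out : String) : Decidable (Spec_mars_rover commands out) := by unfold Spec_mars_rover; infer_instance

-- ===== CLAIM (what is proved, stated in full; the proofs are below) =====
def Claim_equal_mars_rover : Prop := ∀ (commands : String), Dom_mars_rover commands → Spec_mars_rover commands (mars_rover commands)

-- ===== LEMMAS AND PROOFS =====

-- the invariant tying A's (direction, x, y) to B's frame position and turn counter:
-- the world coordinates are the frame coordinates rotated (k mod 4) quarter-turns
def RoverInv (a : String × Int × Int) (b : Int × Int × Int) : Prop :=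
  0 ≤ b.1 ∧ b.1 ≤ 9 ∧ 0 ≤ b.2.1 ∧ b.2.1 ≤ 9 ∧
  ((b.2.2 % 4 = 0 ∧ a.1 = "N" ∧ a.2.1 = b.1 ∧ a.2.2 = b.2.1) ∨
   (b.2.2 % 4 = 1 ∧ a.1 = "E" ∧ a.2.1 = b.2.1 ∧ a.2.2 = (-b.1) % 10) ∨
   (b.2.2 % 4 = 2 ∧ a.1 = "S" ∧ a.2.1 = (-b.1) % 10 ∧ a.2.2 = (-b.2.1) % 10) ∨
   (b.2.2 % 4 = 3 ∧ a.1 = "W" ∧ a.2.1 = (-b.2.1) % 10 ∧ a.2.2 = b.1))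

lemma pymod10 (a : Int) : PySem.Int.mod a 10 = a % 10 :=
  PySem.Int.mod_eq_emod_of_pos (by norm_num)

lemma pymod4 (a : Int) : PySem.Int.mod a 4 = a % 4 :=
  PySem.Int.mod_eq_emod_of_pos (by norm_num)

lemma turn_other (d : String) (hd : d ∈ pyDIRECTIONS) (c : Char)
    (hR : c ≠ 'R') (hL : c ≠ 'L') : turn d c = d := by
  fin_cases hd <;> simp only [turn, if_neg hR, if_neg hL] <;> decide

lemma step_inv (a : String × Int × Int) (b : Int × Int × Int) (c : Char)
    (h : RoverInv a b) : RoverInv (marsStep a c) (altStep b c) := by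
  obtain ⟨dir, ax, ay⟩ := a
  obtain ⟨x, y, k⟩ := b
  obtain ⟨h1, h2, h3, h4, hd⟩ := h
  simp only at h1 h2 h3 h4 hd
  by_cases hF : c = 'F'
  · subst hF
    rcases hd with ⟨hm, hdir, hax, hay⟩ | ⟨hm, hdir, hax, hay⟩ |
      ⟨hm, hdir, hax, hay⟩ | ⟨hm, hdir, hax, hay⟩ <;> subst hdir hax hay <;>
    · simp only [marsStep, altStep, reduceIte, pymod10, RoverInv,
        show ((pyVector.get? "N").getD (0,0)) = ((0:Int), (1:Int)) from by decide,
        show ((pyVector.get? "E").getD (0,0)) = ((1:Int), (0:Int)) from by decide,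
        show ((pyVector.get? "S").getD (0,0)) = ((0:Int), (-1:Int)) from by decide,
        show ((pyVector.get? "W").getD (0,0)) = ((-1:Int), (0:Int)) from by decide]
      refine ⟨by omega, by omega, by omega, by omega, ?_⟩
      first
      | exact Or.inl ⟨by omega, by decide, by unfold warp_drive; split_ifs <;> omega,
          by unfold warp_drive; split_ifs <;> omega⟩
      | exact Or.inr (Or.inl ⟨by omega, by decide, by unfold warp_drive; split_ifs <;> omega,
          by unfold warp_drive; split_ifs <;> omega⟩)
      | exact Or.inr (Or.inr (Or.inl ⟨by omega, by decide,
          by unfold warp_drive; split_ifs <;> omega,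
          by unfold warp_drive; split_ifs <;> omega⟩))
      | exact Or.inr (Or.inr (Or.inr ⟨by omega, by decide,
          by unfold warp_drive; split_ifs <;> omega,
          by unfold warp_drive; split_ifs <;> omega⟩))
  · by_cases hR : c = 'R'
    · subst hR
      rcases hd with ⟨hm, hdir, hax, hay⟩ | ⟨hm, hdir, hax, hay⟩ |
        ⟨hm, hdir, hax, hay⟩ | ⟨hm, hdir, hax, hay⟩ <;> subst hdir hax hay <;>
      · simp only [marsStep, altStep, reduceIte, pymod10, RoverInv,
          if_neg (by decide : ¬ ('R' = 'F'))]
        refine ⟨by omega, by omega, by omega, by omega, ?_⟩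
        first
        | exact Or.inl ⟨by omega, by decide, by unfold warp_drive; split_ifs <;> omega,
            by unfold warp_drive; split_ifs <;> omega⟩
        | exact Or.inr (Or.inl ⟨by omega, by decide,
            by unfold warp_drive; split_ifs <;> omega,
            by unfold warp_drive; split_ifs <;> omega⟩)
        | exact Or.inr (Or.inr (Or.inl ⟨by omega, by decide,
            by unfold warp_drive; split_ifs <;> omega,
            by unfold warp_drive; split_ifs <;> omega⟩))
        | exact Or.inr (Or.inr (Or.inr ⟨by omega, by decide,
            by unfold warp_drive; split_ifs <;> omega,
            by unfold warp_drive; split_ifs <;> omega⟩))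
    · by_cases hL : c = 'L'
      · subst hL
        rcases hd with ⟨hm, hdir, hax, hay⟩ | ⟨hm, hdir, hax, hay⟩ |
          ⟨hm, hdir, hax, hay⟩ | ⟨hm, hdir, hax, hay⟩ <;> subst hdir hax hay <;>
        · simp only [marsStep, altStep, reduceIte, pymod10, RoverInv,
            if_neg (by decide : ¬ ('L' = 'F')), if_neg (by decide : ¬ ('L' = 'R'))]
          refine ⟨by omega, by omega, by omega, by omega, ?_⟩
          first
          | exact Or.inl ⟨by omega, by decide, by unfold warp_drive; split_ifs <;> omega,
              by unfold warp_drive; split_ifs <;> omega⟩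
          | exact Or.inr (Or.inl ⟨by omega, by decide,
              by unfold warp_drive; split_ifs <;> omega,
              by unfold warp_drive; split_ifs <;> omega⟩)
          | exact Or.inr (Or.inr (Or.inl ⟨by omega, by decide,
              by unfold warp_drive; split_ifs <;> omega,
              by unfold warp_drive; split_ifs <;> omega⟩))
          | exact Or.inr (Or.inr (Or.inr ⟨by omega, by decide,
              by unfold warp_drive; split_ifs <;> omega,
              by unfold warp_drive; split_ifs <;> omega⟩))
      · rcases hd with ⟨hm, hdir, hax, hay⟩ | ⟨hm, hdir, hax, hay⟩ |
          ⟨hm, hdir, hax, hay⟩ | ⟨hm, hdir, hax, hay⟩ <;> subst hdir hax hay <;>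
        · simp only [marsStep, altStep, if_neg hF, if_neg hR, if_neg hL, RoverInv]
          rw [turn_other _ (by decide) c hR hL]
          refine ⟨by omega, by omega, by omega, by omega, ?_⟩
          first
          | exact Or.inl ⟨by omega, rfl, by unfold warp_drive; split_ifs <;> omega,
              by unfold warp_drive; split_ifs <;> omega⟩
          | exact Or.inr (Or.inl ⟨by omega, rfl,
              by unfold warp_drive; split_ifs <;> omega,
              by unfold warp_drive; split_ifs <;> omega⟩)
          | exact Or.inr (Or.inr (Or.inl ⟨by omega, rfl,
              by unfold warp_drive; split_ifs <;> omega,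
              by unfold warp_drive; split_ifs <;> omega⟩))
          | exact Or.inr (Or.inr (Or.inr ⟨by omega, rfl,
              by unfold warp_drive; split_ifs <;> omega,
              by unfold warp_drive; split_ifs <;> omega⟩))

lemma fold_inv (l : List Char) (a : String × Int × Int) (b : Int × Int × Int)
    (h : RoverInv a b) : RoverInv (l.foldl marsStep a) (l.foldl altStep b) := by
  induction l generalizing a b with
  | nil => exact h
  | cons c t ih => exact ih _ _ (step_inv a b c h)

lemma final_eq (sa : String × Int × Int) (sb : Int × Int × Int)
    (h : RoverInv sa sb) :
    PySem.Int.toStr sa.2.1 ++ ":" ++ PySem.Int.toStr sa.2.2 ++ ":" ++ sa.1 =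
      PySem.Int.toStr ((List.range (PySem.Int.mod sb.2.2 4).toNat).foldl
          (fun (p : Int × Int) _ => (p.2, PySem.Int.mod (-p.1) 10)) (sb.1, sb.2.1)).1 ++
        ":" ++
      PySem.Int.toStr ((List.range (PySem.Int.mod sb.2.2 4).toNat).foldl
          (fun (p : Int × Int) _ => (p.2, PySem.Int.mod (-p.1) 10)) (sb.1, sb.2.1)).2 ++
        ":" ++
      ((PySem.Str.pyGet? "NESW" (PySem.Int.mod sb.2.2 4)).map
          (fun c => String.ofList [c])).getD "N" := by
  obtain ⟨x, y, k⟩ := sb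
  obtain ⟨dir, ax, ay⟩ := sa
  obtain ⟨h1, h2, h3, h4, hd⟩ := h
  simp only at h1 h2 h3 h4 hd ⊢
  rcases hd with ⟨hm, hdir, hax, hay⟩ | ⟨hm, hdir, hax, hay⟩ |
    ⟨hm, hdir, hax, hay⟩ | ⟨hm, hdir, hax, hay⟩ <;> subst hdir hax hay <;>
    rw [pymod4, hm] <;>
    simp only [show ((0:Int).toNat) = 0 from rfl, show ((1:Int).toNat) = 1 from rfl,
      show ((2:Int).toNat) = 2 from rfl, show ((3:Int).toNat) = 3 from rfl,
      show List.range 0 = [] from rfl, show List.range 1 = [0] from rfl,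
      show List.range 2 = [0, 1] from rfl, show List.range 3 = [0, 1, 2] from rfl,
      List.foldl_cons, List.foldl_nil, pymod10]
  · rfl
  · rfl
  · rfl
  · rw [show -(-ay % 10) % 10 = ay by omega]; rfl

-- ===== VERDICT (by name: the statement is the Claim_ definition above) =====
theorem mars_rover_spec : Claim_equal_mars_rover := by
  intro commands _
  unfold Spec_mars_rover mars_rover mars_rover_alt
  exact final_eq _ _ (fold_inv commands.toList ("N", 0, 0) (0, 0, 0)
    ⟨by norm_num, by norm_num, by norm_num, by norm_num,
      Or.inl ⟨by norm_num, rfl, rfl, rfl⟩⟩)
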